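-- pv_equiv track=rewrite | github.com/soerenwolfers/swutil | swutil/parsing.py | removeNestedParentheses
-- ===== SOURCE A (Python) =====
-- def removeNestedParentheses(s):
--     ret = ''
--     skip = 0
--     for i in s:
--         if i == '(':
--             skip += 1
--         elif i == ')'and skip > 0:
--             skip -= 1
--         elif skip == 0:
--             ret += i
--     return ret
-- ===== SOURCE B (Python) =====
-- def removeNestedParentheses(s):
--     # pass 1: clamped nesting depth *before* each character
--     depths = [0]
--     for c in s:
--         d = depths[-1]
--         depths.append(d + 1 if c == '(' else d - 1 if c == ')' and d > 0 else d)
--     # pass 2: keep every char whose before-depth is 0, except '('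
--     return ''.join(c for c, d in zip(s, depths) if d == 0 and c != '(')
-- ===== Notes on version B (the rewrite author's own statement) =====
-- stated objective: alternative
-- what changed: Replaces the single loop that interleaves counter updates with string appends by two separate passes: first a prefix scan computing the clamped nesting depth before each character, then a filter-and-join selecting characters at depth 0 that are not '('.
import Mathlib
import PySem

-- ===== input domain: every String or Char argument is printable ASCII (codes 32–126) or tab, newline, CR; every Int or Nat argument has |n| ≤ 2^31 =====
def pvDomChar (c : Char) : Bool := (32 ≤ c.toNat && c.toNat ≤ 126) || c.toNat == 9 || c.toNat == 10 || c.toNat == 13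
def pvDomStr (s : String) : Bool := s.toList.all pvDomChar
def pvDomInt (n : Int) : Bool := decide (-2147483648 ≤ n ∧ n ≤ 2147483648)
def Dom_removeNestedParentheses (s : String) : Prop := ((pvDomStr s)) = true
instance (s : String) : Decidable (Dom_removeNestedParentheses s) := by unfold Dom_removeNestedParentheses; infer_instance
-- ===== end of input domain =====

-- B separates the clamped depth-prefix scan from the selection pass instead of interleaving counter updates with appends; return values proved equal on all inputs.


-- ===== PORT A =====
-- loop body of A, named: state is (ret as List Char, skip)
def pvStepA (acc : List Char × Int) (i : Char) : List Char × Int :=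
  if i = '(' then (acc.1, acc.2 + 1)
  else if i = ')' ∧ acc.2 > 0 then (acc.1, acc.2 - 1)
  else if acc.2 = 0 then (acc.1 ++ [i], acc.2)
  else acc

def removeNestedParentheses (s : String) : String :=
  String.ofList (s.toList.foldl pvStepA ([], 0)).1

-- ===== PORT B =====
-- the accumulate step of Source B
def pvStepDepth (d : Int) (c : Char) : Int :=
  if c = '(' then d + 1 else if c = ')' ∧ d > 0 then d - 1 else d

-- depths after each char (Source B's depths list minus the leading 0)
def pvScanDepth (d : Int) : List Char → List Int
  | [] => []
  | c :: cs => let d' := pvStepDepth d c; d' :: pvScanDepth d' cs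

def removeNestedParentheses_alt (s : String) : String :=
  let cs := s.toList
  let depths := 0 :: pvScanDepth 0 cs
  String.ofList (((cs.zip depths).filter (fun p => p.2 = 0 ∧ p.1 ≠ '(')).map Prod.fst)

-- ===== PRECONDITION & SPEC =====
def Spec_removeNestedParentheses (s : String) (out : String) : Prop := out = removeNestedParentheses_alt s
instance (s : String) (out : String) : Decidable (Spec_removeNestedParentheses s out) := by unfold Spec_removeNestedParentheses; infer_instance

-- ===== CLAIM (what is proved, stated in full; the proofs are below) =====
def Claim_equal_removeNestedParentheses : Prop := ∀ (s : String), Dom_removeNestedParentheses s → Spec_removeNestedParentheses s (removeNestedParentheses s)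

-- ===== LEMMAS AND PROOFS =====
lemma foldA_eq (cs : List Char) : ∀ (r : List Char) (d : Int), 0 ≤ d →
    (cs.foldl pvStepA (r, d)).1 =
      r ++ ((cs.zip (d :: pvScanDepth d cs)).filter (fun p => p.2 = 0 ∧ p.1 ≠ '(')).map Prod.fst := by
  induction cs with
  | nil => intro r d _; simp
  | cons c cs ih =>
    intro r d hd
    simp only [List.foldl_cons, pvScanDepth, List.zip_cons_cons, List.filter_cons]
    by_cases h1 : c = '('
    · subst h1
      simp only [pvStepA, pvStepDepth, if_true]
      rw [ih r (d + 1) (by omega)]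
      simp
    · by_cases h2 : c = ')' ∧ d > 0
      · simp only [pvStepA, pvStepDepth, if_neg h1, if_pos h2]
        rw [ih r (d - 1) (by omega)]
        have : ¬ (d = 0 ∧ c ≠ '(') := by rintro ⟨h, _⟩; omega
        simp [this]
      · have hstep : pvStepDepth d c = d := by simp [pvStepDepth, h1, h2]
        by_cases h3 : d = 0
        · subst h3
          simp only [pvStepA, if_neg h1, if_neg h2, if_true]
          rw [ih (r ++ [c]) 0 (le_refl 0)]
          simp [hstep, h1]
        · simp only [pvStepA, if_neg h1, if_neg h2, if_neg h3]
          rw [ih r d hd]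
          simp [hstep, h3]

-- ===== VERDICT (by name: the statement is the Claim_ definition above) =====
theorem removeNestedParentheses_spec : Claim_equal_removeNestedParentheses := by
  intro s _
  show _ = _
  simp [removeNestedParentheses, removeNestedParentheses_alt,
    foldA_eq s.toList [] 0 (le_refl 0)]
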